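-- pv_equiv track=rewrite | github.com/sisyphus111/sglang_dev | examples/runtime/engine/run_compare_decoupled_spec_decode_batch.py | _sort_gpu_ids
-- ===== SOURCE A (Python) =====
-- from typing import Any
--
-- def _sort_gpu_ids(gpu_ids: list[Any]) -> list[str]:
--     def sort_key(value: Any) -> tuple[int, Any]:
--         text = str(value)
--         try:
--             return (0, int(text))
--         except ValueError:
--             return (1, text)
--
--     return [str(value) for value in sorted(gpu_ids, key=sort_key)]
-- ===== SOURCE B (Python) =====
-- def _sort_gpu_ids(gpu_ids):
--     numbers = []
--     strings = []
--     for value in gpu_ids: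
--         text = str(value)
--         try:
--             int(text)
--             numbers.append(value)
--         except ValueError:
--             strings.append(value)
--     numbers.sort(key=lambda v: int(str(v)))
--     strings.sort(key=lambda v: str(v))
--     return [str(v) for v in numbers + strings]
-- ===== Notes on version B (the rewrite author's own statement) =====
-- stated objective: alternative
-- what changed: Replaces the single sort with a compound (tag, key) tuple by a one-pass partition into int-parsable and non-parsable values followed by two independent stable sorts (numeric and lexicographic) that are concatenated.
import Mathlib
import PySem

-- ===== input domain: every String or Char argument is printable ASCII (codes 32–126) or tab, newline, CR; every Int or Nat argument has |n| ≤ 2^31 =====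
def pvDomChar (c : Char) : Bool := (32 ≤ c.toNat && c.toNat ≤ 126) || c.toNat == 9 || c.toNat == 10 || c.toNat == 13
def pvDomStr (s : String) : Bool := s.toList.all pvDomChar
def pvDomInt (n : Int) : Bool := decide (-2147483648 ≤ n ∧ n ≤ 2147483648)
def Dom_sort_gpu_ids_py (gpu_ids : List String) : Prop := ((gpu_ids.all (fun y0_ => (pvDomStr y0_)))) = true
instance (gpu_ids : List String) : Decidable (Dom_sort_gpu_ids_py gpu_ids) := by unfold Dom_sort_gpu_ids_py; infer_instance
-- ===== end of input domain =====

-- B replaces A's single stable sort with a compound (tag, key) tuple by a one-pass partition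
-- into int-parsable / non-parsable values followed by two independent stable sorts (alternative
-- decomposition, same asymptotic cost).


-- ===== PORT A =====
-- A's key (0, int(text)) / (1, text) is a heterogeneous tuple; it is encoded as the
-- lexicographic sum Lex (Int ⊕ String): every inl _ < every inr _, inl/inl compare as Int,
-- inr/inr compare as String — exactly Python's comparison of those tuples.
def pySortKey (value : String) : Lex (Int ⊕ String) :=
  match PySem.Int.ofStr? value with      -- try: int(text) / except ValueError
  | some n => toLex (Sum.inl n)          -- (0, int(text))
  | none   => toLex (Sum.inr value)      -- (1, text); text = str(value) = value on String input

def sort_gpu_ids_py (gpu_ids : List String) : List String :=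
  (PySem.List.sorted gpu_ids pySortKey false).map (fun value => value)  -- str(value) = value on String

-- ===== PORT B =====
-- Source B: one pass classifying each value by whether int(str(value)) parses, then two stable
-- sorts (numeric / lexicographic) and a concatenation.
def sort_gpu_ids_py_alt (gpu_ids : List String) : List String :=
  let p := gpu_ids.foldl
    (fun (acc : List String × List String) value =>
      match PySem.Int.ofStr? value with          -- try: int(text) / except ValueError
      | some _ => (acc.1 ++ [value], acc.2)      -- numbers.append(value)
      | none   => (acc.1, acc.2 ++ [value]))     -- strings.append(value)
    ([], [])
  -- key = int(str(v)); the .getD 0 default is never taken: every member of p.1 parses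
  let numbers := PySem.List.sorted p.1 (fun v => (PySem.Int.ofStr? v).getD 0) false
  let strings := PySem.List.sorted p.2 (fun v => v) false
  (numbers ++ strings).map (fun v => v)          -- str(v) = v on String

-- ===== PRECONDITION & SPEC =====
def Spec_sort_gpu_ids_py (gpu_ids : List String) (out : List String) : Prop := out = sort_gpu_ids_py_alt gpu_ids
instance (gpu_ids : List String) (out : List String) : Decidable (Spec_sort_gpu_ids_py gpu_ids out) := by unfold Spec_sort_gpu_ids_py; infer_instance

-- ===== CLAIM (what is proved, stated in full; the proofs are below) =====
def Claim_equal_sort_gpu_ids_py : Prop := ∀ (gpu_ids : List String), Dom_sort_gpu_ids_py gpu_ids → Spec_sort_gpu_ids_py gpu_ids (sort_gpu_ids_py gpu_ids)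

-- ===== LEMMAS AND PROOFS =====

-- insertBy only looks at `before v ·` on the members of the list
theorem insertBy_congr {α : Type} (b b' : α → α → Bool) (v : α) :
    ∀ ys : List α, (∀ y ∈ ys, b v y = b' v y) →
      PySem.List.insertBy b v ys = PySem.List.insertBy b' v ys := by
  intro ys
  induction ys with
  | nil => intro _; rfl
  | cons y ys ih =>
    intro h
    have hy : b v y = b' v y := h y (List.mem_cons_self)
    simp only [PySem.List.insertBy, hy]
    split_ifs with hb
    · rfl
    · rw [ih (fun z hz => h z (List.mem_cons_of_mem _ hz))]

-- inserting an element that goes before everything in SB splits off SB unchanged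
theorem insertBy_append_of_before {α : Type} (b : α → α → Bool) (v : α) (SB : List α)
    (hSB : ∀ s ∈ SB, b v s = true) :
    ∀ NA : List α, PySem.List.insertBy b v (NA ++ SB) = PySem.List.insertBy b v NA ++ SB := by
  intro NA
  induction NA with
  | nil =>
    cases SB with
    | nil => rfl
    | cons s t =>
      simp [List.nil_append, PySem.List.insertBy, hSB s (List.mem_cons_self)]
  | cons y NA ih =>
    simp only [List.cons_append, PySem.List.insertBy]
    split_ifs with hb
    · rfl
    · rw [ih]; rfl

-- inserting an element that goes after everything in NA passes NA through unchanged
theorem insertBy_append_of_after {α : Type} (b : α → α → Bool) (v : α) (SB : List α) :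
    ∀ NA : List α, (∀ y ∈ NA, b v y = false) →
      PySem.List.insertBy b v (NA ++ SB) = NA ++ PySem.List.insertBy b v SB := by
  intro NA
  induction NA with
  | nil => intro _; rfl
  | cons y NA ih =>
    intro h
    simp only [List.cons_append, PySem.List.insertBy, h y (List.mem_cons_self)]
    simp only [Bool.false_eq_true, if_false]
    rw [ih (fun z hz => h z (List.mem_cons_of_mem _ hz))]

-- the three comparison facts about pySortKey
theorem keyLt_num_num {x y : String} {n m : Int}
    (hx : PySem.Int.ofStr? x = some n) (hy : PySem.Int.ofStr? y = some m) :
    decide (pySortKey x < pySortKey y)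
      = decide ((PySem.Int.ofStr? x).getD 0 < (PySem.Int.ofStr? y).getD 0) := by
  simp only [pySortKey, hx, hy, Option.getD_some]
  exact decide_eq_decide.mpr Sum.Lex.inl_lt_inl_iff

theorem keyLt_num_str {x y : String} {n : Int}
    (hx : PySem.Int.ofStr? x = some n) (hy : PySem.Int.ofStr? y = none) :
    decide (pySortKey x < pySortKey y) = true := by
  simp only [pySortKey, hx, hy]
  exact decide_eq_true (Sum.Lex.inl_lt_inr n y)

theorem keyLt_str_num {x y : String} {m : Int}
    (hx : PySem.Int.ofStr? x = none) (hy : PySem.Int.ofStr? y = some m) :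
    decide (pySortKey x < pySortKey y) = false := by
  simp only [pySortKey, hx, hy]
  exact decide_eq_false Sum.Lex.not_inr_lt_inl

theorem keyLt_str_str {x y : String}
    (hx : PySem.Int.ofStr? x = none) (hy : PySem.Int.ofStr? y = none) :
    decide (pySortKey x < pySortKey y) = decide (x < y) := by
  simp only [pySortKey, hx, hy]
  exact decide_eq_decide.mpr Sum.Lex.inr_lt_inr_iff

-- main invariant: the insertion-sort fold with the compound key, started on a
-- numbers-prefix/strings-suffix accumulator, is the pair of independent folds
theorem sort_split : ∀ (xs NA SB : List String),
    (∀ y ∈ NA, (PySem.Int.ofStr? y).isSome = true) →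
    (∀ y ∈ SB, PySem.Int.ofStr? y = none) →
    xs.foldl (fun acc x => PySem.List.insertBy (fun a b => decide (pySortKey a < pySortKey b)) x acc) (NA ++ SB)
      = (xs.filter (fun x => (PySem.Int.ofStr? x).isSome)).foldl
          (fun acc x => PySem.List.insertBy
            (fun a b => decide ((PySem.Int.ofStr? a).getD 0 < (PySem.Int.ofStr? b).getD 0)) x acc) NA
        ++ (xs.filter (fun x => !(PySem.Int.ofStr? x).isSome)).foldl
          (fun acc x => PySem.List.insertBy (fun a b => decide (a < b)) x acc) SB := by
  intro xs
  induction xs with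
  | nil => intro NA SB _ _; rfl
  | cons x xs ih =>
    intro NA SB hNA hSB
    cases h : PySem.Int.ofStr? x with
    | some n =>
      have hfilt : (PySem.Int.ofStr? x).isSome = true := by rw [h]; rfl
      simp only [List.foldl_cons, List.filter_cons, hfilt, Bool.not_true, List.foldl_cons]
      have h1 : PySem.List.insertBy (fun a b => decide (pySortKey a < pySortKey b)) x (NA ++ SB)
          = PySem.List.insertBy (fun a b => decide (pySortKey a < pySortKey b)) x NA ++ SB :=
        insertBy_append_of_before _ x SB (fun s hs => keyLt_num_str h (hSB s hs)) NA
      have h2 : PySem.List.insertBy (fun a b => decide (pySortKey a < pySortKey b)) x NA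
          = PySem.List.insertBy
              (fun a b => decide ((PySem.Int.ofStr? a).getD 0 < (PySem.Int.ofStr? b).getD 0)) x NA := by
        apply insertBy_congr
        intro y hy
        obtain ⟨m, hm⟩ := Option.isSome_iff_exists.mp (hNA y hy)
        exact keyLt_num_num h hm
      rw [h1, h2]
      apply ih
      · intro y hy
        rcases (PySem.List.mem_insertBy _ _ _ _).mp hy with rfl | hy'
        · rw [h]; rfl
        · exact hNA y hy'
      · exact hSB
    | none =>
      have hfilt : (PySem.Int.ofStr? x).isSome = false := by rw [h]; rfl
      simp only [List.foldl_cons, List.filter_cons, hfilt, Bool.not_false, List.foldl_cons]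
      have h1 : PySem.List.insertBy (fun a b => decide (pySortKey a < pySortKey b)) x (NA ++ SB)
          = NA ++ PySem.List.insertBy (fun a b => decide (pySortKey a < pySortKey b)) x SB := by
        apply insertBy_append_of_after
        intro y hy
        obtain ⟨m, hm⟩ := Option.isSome_iff_exists.mp (hNA y hy)
        exact keyLt_str_num h hm
      have h2 : PySem.List.insertBy (fun a b => decide (pySortKey a < pySortKey b)) x SB
          = PySem.List.insertBy (fun a b => decide (a < b)) x SB := by
        apply insertBy_congr
        intro y hy
        exact keyLt_str_str h (hSB y hy)
      rw [h1, h2]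
      apply ih
      · exact hNA
      · intro y hy
        rcases (PySem.List.mem_insertBy _ _ _ _).mp hy with rfl | hy'
        · exact h
        · exact hSB y hy'

-- B's classification fold is the pair of filters
theorem part_fold : ∀ (xs a b : List String),
    xs.foldl
      (fun (acc : List String × List String) value =>
        match PySem.Int.ofStr? value with
        | some _ => (acc.1 ++ [value], acc.2)
        | none   => (acc.1, acc.2 ++ [value])) (a, b)
      = (a ++ xs.filter (fun x => (PySem.Int.ofStr? x).isSome),
         b ++ xs.filter (fun x => !(PySem.Int.ofStr? x).isSome)) := by
  intro xs
  induction xs with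
  | nil => intro a b; simp
  | cons x xs ih =>
    intro a b
    cases h : PySem.Int.ofStr? x with
    | some n =>
      have hfilt : (PySem.Int.ofStr? x).isSome = true := by rw [h]; rfl
      simp only [List.foldl_cons, h, List.filter_cons]
      rw [ih]
      simp
    | none =>
      have hfilt : (PySem.Int.ofStr? x).isSome = false := by rw [h]; rfl
      simp only [List.foldl_cons, h, List.filter_cons]
      rw [ih]
      simp

-- ===== VERDICT (by name: the statement is the Claim_ definition above) =====
theorem sort_gpu_ids_py_spec : Claim_equal_sort_gpu_ids_py := by
  intro gpu_ids _
  show sort_gpu_ids_py gpu_ids = sort_gpu_ids_py_alt gpu_ids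
  unfold sort_gpu_ids_py sort_gpu_ids_py_alt
  rw [part_fold gpu_ids [] []]
  simp only [List.nil_append]
  rw [PySem.List.sorted_eq_foldl_insertBy, PySem.List.sorted_eq_foldl_insertBy,
    PySem.List.sorted_eq_foldl_insertBy]
  rw [show (([] : List String) = [] ++ ([] : List String)) from rfl] -- split the empty accumulator
  rw [sort_split gpu_ids [] [] (by intro y hy; cases hy) (by intro y hy; cases hy)]
  rfl
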